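-- pv_equiv track=rewrite | github.com/UKAEA-IBM-STFC-Fusion-FMs/tokamind | src/mmt/data/transforms/tune_ranked_dct3d.py | summarize_selection
-- ===== SOURCE A (Python) =====
-- from typing import Any, Iterable
-- from collections.abc import Mapping
--
-- def summarize_selection(
--     best: Mapping[str, Mapping[str, Mapping[str, Any]]],
-- ) -> dict[str, int]:
--     """
--     Return compact counters for tuning summary logs.
--
--     Parameters
--     ----------
--     best : Mapping[str, Mapping[str, Mapping[str, Any]]]
--         Mapping (dict) with data for the selected top coefficients for each signal.
--
--     Returns
--     -------
--     dict[str, int]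
--         Dictionary with counter values (calculated from the `best` mapping) for the "signals", "guardrail_up", and
--         "budget_capped" counters.
--
--     """
--
--     n_signals = 0
--     n_guardrail_up = 0
--     n_budget_capped = 0
--     for by_sig in best.values():
--         for info in by_sig.values():
--             n_signals += 1
--             if bool(info.get("guardrail_increased_k", False)):
--                 n_guardrail_up += 1
--             if bool(info.get("budget_capped", False)):
--                 n_budget_capped += 1
--
--     return {
--         "signals": int(n_signals),
--         "guardrail_up": int(n_guardrail_up),
--         "budget_capped": int(n_budget_capped),
--     }
-- ===== SOURCE B (Python) =====
-- def summarize_selection(best):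
--     infos = [info for by_sig in best.values() for info in by_sig.values()]
--
--     def dc(seq):
--         # divide-and-conquer summary: merge triples of the two halves
--         if not seq:
--             return (0, 0, 0)
--         if len(seq) == 1:
--             i = seq[0]
--             return (1,
--                     1 if bool(i.get("guardrail_increased_k", False)) else 0,
--                     1 if bool(i.get("budget_capped", False)) else 0)
--         mid = len(seq) // 2
--         s1, g1, b1 = dc(seq[:mid])
--         s2, g2, b2 = dc(seq[mid:])
--         return (s1 + s2, g1 + g2, b1 + b2)
--
--     s, g, b = dc(infos)
--     return {"signals": s, "guardrail_up": g, "budget_capped": b}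
-- ===== Notes on version B (the rewrite author's own statement) =====
-- stated objective: alternative
-- what changed: Replaces A's fused three-counter nested loop with a flatten step plus a divide-and-conquer recursion that summarizes each half of the flat list as a (signals, guardrail, budget) triple and merges halves by component-wise addition.
import Mathlib
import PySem

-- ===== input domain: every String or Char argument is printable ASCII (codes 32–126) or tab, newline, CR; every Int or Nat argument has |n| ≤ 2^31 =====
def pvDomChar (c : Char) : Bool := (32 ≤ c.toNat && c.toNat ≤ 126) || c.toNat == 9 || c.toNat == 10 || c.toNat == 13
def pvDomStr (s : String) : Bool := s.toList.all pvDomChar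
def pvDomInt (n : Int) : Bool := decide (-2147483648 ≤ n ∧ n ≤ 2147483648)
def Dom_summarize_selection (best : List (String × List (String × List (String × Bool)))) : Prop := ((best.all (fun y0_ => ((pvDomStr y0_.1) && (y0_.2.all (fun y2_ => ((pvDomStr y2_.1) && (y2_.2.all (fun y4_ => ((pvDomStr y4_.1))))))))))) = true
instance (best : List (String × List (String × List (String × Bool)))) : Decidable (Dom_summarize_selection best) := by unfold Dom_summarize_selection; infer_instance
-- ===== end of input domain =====

-- B replaces A's fused three-counter nested loop with a flatten step plus a
-- divide-and-conquer recursion merging (signals, guardrail, budget) triples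
-- (alternative decomposition; no speed claim).

-- info.get(key, False): first-match lookup in the info dict with default False (shared dict-get primitive)
def infoGet (info : List (String × Bool)) (key : String) : Bool :=
  ((info.find? (fun q => q.1 == key)).map (·.2)).getD false

-- ===== PORT A =====
def summarize_selection (best : List (String × List (String × List (String × Bool)))) : List (String × Int) :=
  let acc : Int × Int × Int :=
    best.foldl (fun acc p =>
      p.2.foldl (fun acc q =>
        let s := acc.1 + 1
        let g := if infoGet q.2 "guardrail_increased_k" then acc.2.1 + 1 else acc.2.1
        let b := if infoGet q.2 "budget_capped" then acc.2.2 + 1 else acc.2.2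
        (s, g, b)) acc) (0, 0, 0)
  [("signals", acc.1), ("guardrail_up", acc.2.1), ("budget_capped", acc.2.2)]

-- ===== PORT B =====
-- dc(seq) of Source B: summarize each half, merge by component-wise addition
def dcSummary : List (List (String × Bool)) → Int × Int × Int
  | [] => (0, 0, 0)
  | [i] => (1, if infoGet i "guardrail_increased_k" then 1 else 0,
               if infoGet i "budget_capped" then 1 else 0)
  | x :: y :: t =>
    let seq := x :: y :: t
    let mid := seq.length / 2
    let l := dcSummary (seq.take mid)
    let r := dcSummary (seq.drop mid)
    (l.1 + r.1, l.2.1 + r.2.1, l.2.2 + r.2.2)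
termination_by seq => seq.length
decreasing_by
  · simp only [List.length_take, List.length_cons]; omega
  · simp only [List.length_drop, List.length_cons]; omega

def summarize_selection_alt (best : List (String × List (String × List (String × Bool)))) : List (String × Int) :=
  let infos : List (List (String × Bool)) := best.flatMap (fun p => p.2.map (·.2))
  let r := dcSummary infos
  [("signals", r.1), ("guardrail_up", r.2.1), ("budget_capped", r.2.2)]

-- ===== PRECONDITION & SPEC =====
def Spec_summarize_selection (best : List (String × List (String × List (String × Bool)))) (out : List (String × Int)) : Prop := out = summarize_selection_alt best
instance (best : List (String × List (String × List (String × Bool)))) (out : List (String × Int)) : Decidable (Spec_summarize_selection best out) := by unfold Spec_summarize_selection; infer_instance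

-- ===== CLAIM (what is proved, stated in full; the proofs are below) =====
def Claim_equal_summarize_selection : Prop := ∀ (best : List (String × List (String × List (String × Bool)))), Dom_summarize_selection best → Spec_summarize_selection best (summarize_selection best)

-- ===== LEMMAS AND PROOFS =====

-- both ports compute (length, countP guardrail, countP budget) of the flat info list

theorem dcSummary_eq (l : List (List (String × Bool))) :
    dcSummary l = ((l.length : Int),
      (l.countP (fun i => infoGet i "guardrail_increased_k") : Int),
      (l.countP (fun i => infoGet i "budget_capped") : Int)) := by
  induction l using dcSummary.induct with
  | case1 => simp [dcSummary]
  | case2 i => simp [dcSummary, List.countP_cons]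
  | case3 x y t seq mid ihtake ihdrop =>
      rw [dcSummary]
      simp only [seq, mid] at ihtake ihdrop ⊢
      simp only [ihtake, ihdrop, Prod.mk.injEq]
      have hsplit : ∀ (p : List (String × Bool) → Bool),
          ((x :: y :: t).take ((x :: y :: t).length / 2)).countP p
            + ((x :: y :: t).drop ((x :: y :: t).length / 2)).countP p
          = (x :: y :: t).countP p := by
        intro p
        rw [← List.countP_append, List.take_append_drop]
      have hlen : ((x :: y :: t).take ((x :: y :: t).length / 2)).length
            + ((x :: y :: t).drop ((x :: y :: t).length / 2)).length
          = (x :: y :: t).length := by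
        rw [← List.length_append, List.take_append_drop]
      refine ⟨?_, ?_, ?_⟩
      · omega
      · have := hsplit (fun i => infoGet i "guardrail_increased_k"); omega
      · have := hsplit (fun i => infoGet i "budget_capped"); omega

-- inner loop over one by_sig, from an arbitrary accumulator
theorem inner_foldl (l : List (String × List (String × Bool))) (acc : Int × Int × Int) :
    l.foldl (fun acc q =>
        let s := acc.1 + 1
        let g := if infoGet q.2 "guardrail_increased_k" then acc.2.1 + 1 else acc.2.1
        let b := if infoGet q.2 "budget_capped" then acc.2.2 + 1 else acc.2.2
        (s, g, b)) acc
    = (acc.1 + l.length,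
       acc.2.1 + (l.map (·.2)).countP (fun i => infoGet i "guardrail_increased_k"),
       acc.2.2 + (l.map (·.2)).countP (fun i => infoGet i "budget_capped")) := by
  induction l generalizing acc with
  | nil => simp
  | cons q t ih =>
      simp only [List.foldl_cons, ih, List.map_cons, List.length_cons, List.countP_cons]
      obtain ⟨s, g, b⟩ := acc
      by_cases h1 : infoGet q.2 "guardrail_increased_k" <;>
        by_cases h2 : infoGet q.2 "budget_capped" <;>
        simp [h1, h2, Prod.ext_iff] <;> omega

theorem outer_foldl (best : List (String × List (String × List (String × Bool)))) (acc : Int × Int × Int) :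
    best.foldl (fun acc p =>
      p.2.foldl (fun acc q =>
        let s := acc.1 + 1
        let g := if infoGet q.2 "guardrail_increased_k" then acc.2.1 + 1 else acc.2.1
        let b := if infoGet q.2 "budget_capped" then acc.2.2 + 1 else acc.2.2
        (s, g, b)) acc) acc
    = (acc.1 + (best.flatMap (fun p => p.2.map (·.2))).length,
       acc.2.1 + (best.flatMap (fun p => p.2.map (·.2))).countP (fun i => infoGet i "guardrail_increased_k"),
       acc.2.2 + (best.flatMap (fun p => p.2.map (·.2))).countP (fun i => infoGet i "budget_capped")) := by
  induction best generalizing acc with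
  | nil => simp
  | cons p t ih =>
      rw [List.foldl_cons, inner_foldl, ih]
      simp [Prod.ext_iff, List.countP_append]; omega

-- ===== VERDICT (by name: the statement is the Claim_ definition above) =====
theorem summarize_selection_spec : Claim_equal_summarize_selection := by
  intro best _
  unfold Spec_summarize_selection summarize_selection summarize_selection_alt
  simp only [outer_foldl, dcSummary_eq]
  simp
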